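-- pv_equiv track=rewrite | github.com/paiml/depyler | examples/hard_compute_finance.py | loan_total_payment
-- ===== SOURCE A (Python) =====
-- def loan_total_payment(principal: int, annual_rate_bp: int, years: int) -> int:
--     """Approximate total loan payment using iterative amortization."""
--     monthly_rate: int = annual_rate_bp // 12
--     num_payments: int = years * 12
--     if monthly_rate == 0:
--         return principal
--     balance: int = principal * 10000
--     total_paid: int = 0
--     monthly_payment: int = balance * monthly_rate // (10000 - power_frac(10000, 10000 + monthly_rate, num_payments))
--     if monthly_payment <= 0:
--         monthly_payment = balance // num_payments
--     p: int = 0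
--     while p < num_payments:
--         interest_part: int = balance * monthly_rate // 10000
--         total_paid = total_paid + monthly_payment
--         balance = balance + interest_part - monthly_payment
--         if balance < 0:
--             balance = 0
--         p = p + 1
--     return total_paid // 10000
--
-- def power_frac(numerator: int, denominator: int, n: int) -> int:
--     """Compute (numerator/denominator)^n as integer fraction * numerator^0 scale."""
--     result: int = numerator
--     i: int = 0
--     while i < n:
--         result = result * numerator // denominator
--         i = i + 1
--     return result
-- ===== SOURCE B (Python) =====
-- def loan_total_payment(principal: int, annual_rate_bp: int, years: int) -> int:
--     """Total loan payment: the amortization loop only adds monthly_payment each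
--     of the num_payments iterations, so the total is monthly_payment * num_payments."""
--     monthly_rate = annual_rate_bp // 12
--     if monthly_rate == 0:
--         return principal
--     num_payments = years * 12
--     scaled = principal * 10000
--     factor = 10000
--     for _ in range(num_payments):
--         factor = factor * 10000 // (10000 + monthly_rate)
--     monthly_payment = scaled * monthly_rate // (10000 - factor)
--     if monthly_payment <= 0:
--         monthly_payment = scaled // num_payments
--     return monthly_payment * num_payments // 10000
-- ===== Notes on version B (the rewrite author's own statement) =====
-- stated objective: faster
-- what changed: The month-by-month amortization loop (balance/interest/total bookkeeping) is removed entirely: since each iteration only adds monthly_payment to the total, B returns monthly_payment * num_payments // 10000 directly, keeping only the O(n) power_frac factor computation (written as a for-loop).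
import Mathlib
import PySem

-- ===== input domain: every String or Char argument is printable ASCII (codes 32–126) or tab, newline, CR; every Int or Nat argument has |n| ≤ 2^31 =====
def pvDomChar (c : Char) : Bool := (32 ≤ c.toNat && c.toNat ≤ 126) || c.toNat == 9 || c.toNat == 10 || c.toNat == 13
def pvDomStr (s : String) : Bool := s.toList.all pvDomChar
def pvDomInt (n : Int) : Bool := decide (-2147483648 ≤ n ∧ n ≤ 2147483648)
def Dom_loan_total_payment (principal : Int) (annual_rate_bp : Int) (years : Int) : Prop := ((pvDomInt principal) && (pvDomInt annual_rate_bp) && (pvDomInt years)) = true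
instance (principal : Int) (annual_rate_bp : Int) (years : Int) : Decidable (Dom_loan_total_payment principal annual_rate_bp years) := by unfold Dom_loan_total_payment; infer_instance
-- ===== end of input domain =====

-- B removes A's month-by-month amortization loop: each iteration only adds monthly_payment,
-- so the total is monthly_payment * num_payments; only the power_frac loop remains (constant-factor faster).


-- ===== PORT A =====
-- power_frac: while i < n loop, fuel = n.toNat (while with n ≤ 0 runs 0 times)
def pvPowerFracGo (numerator denominator : Int) : Nat → Int → Int
  | 0, result => result
  | k+1, result => pvPowerFracGo numerator denominator k (PySem.Int.floordiv (result * numerator) denominator)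

def power_frac (numerator denominator n : Int) : Int :=
  pvPowerFracGo numerator denominator n.toNat numerator

-- the amortization while loop of A, fuel = num_payments.toNat; state (balance, total_paid)
def pvAmortGo (monthly_rate monthly_payment : Int) : Nat → Int → Int → Int
  | 0, _, total_paid => total_paid
  | k+1, balance, total_paid =>
      let interest_part := PySem.Int.floordiv (balance * monthly_rate) 10000
      let total_paid' := total_paid + monthly_payment
      let balance' := balance + interest_part - monthly_payment
      let balance' := if balance' < 0 then 0 else balance'
      pvAmortGo monthly_rate monthly_payment k balance' total_paid'

def loan_total_payment (principal : Int) (annual_rate_bp : Int) (years : Int) : Int :=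
  let monthly_rate := PySem.Int.floordiv annual_rate_bp 12
  let num_payments := years * 12
  if monthly_rate = 0 then principal
  else
    let balance := principal * 10000
    let total_paid : Int := 0
    let monthly_payment :=
      PySem.Int.floordiv (balance * monthly_rate)
        (10000 - power_frac 10000 (10000 + monthly_rate) num_payments)
    let monthly_payment :=
      if monthly_payment ≤ 0 then PySem.Int.floordiv balance num_payments else monthly_payment
    PySem.Int.floordiv (pvAmortGo monthly_rate monthly_payment num_payments.toNat balance total_paid) 10000

-- ===== PORT B =====
def loan_total_payment_alt (principal : Int) (annual_rate_bp : Int) (years : Int) : Int :=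
  let monthly_rate := PySem.Int.floordiv annual_rate_bp 12
  if monthly_rate = 0 then principal
  else
    let num_payments := years * 12
    let scaled := principal * 10000
    let factor := (PySem.List.pyRange 0 num_payments 1).foldl
      (fun f _ => PySem.Int.floordiv (f * 10000) (10000 + monthly_rate)) 10000
    let monthly_payment := PySem.Int.floordiv (scaled * monthly_rate) (10000 - factor)
    let monthly_payment :=
      if monthly_payment ≤ 0 then PySem.Int.floordiv scaled num_payments else monthly_payment
    PySem.Int.floordiv (monthly_payment * num_payments) 10000

-- ===== PRECONDITION & SPEC =====
-- Pre_ excludes exactly the inputs where the Python A raises ZeroDivisionError: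
-- monthly_rate ≠ 0 together with years ≤ 0 (power_frac runs 0 times, denominator 10000-10000=0),
-- or monthly_rate = -10000 (power_frac divides by 0), or monthly_rate = -20000
-- (power_frac cycles 10000,-10000 and returns 10000 after the even num_payments steps).
def Pre_loan_total_payment (principal : Int) (annual_rate_bp : Int) (years : Int) : Prop :=
  PySem.Int.floordiv annual_rate_bp 12 = 0 ∨
    (1 ≤ years ∧ PySem.Int.floordiv annual_rate_bp 12 ≠ -10000 ∧
      PySem.Int.floordiv annual_rate_bp 12 ≠ -20000)
instance (principal : Int) (annual_rate_bp : Int) (years : Int) : Decidable (Pre_loan_total_payment principal annual_rate_bp years) := by unfold Pre_loan_total_payment; infer_instance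

def pvWitness_loan_total_payment : Int × Int × Int := (250000, 600, 30)

def Spec_loan_total_payment (principal : Int) (annual_rate_bp : Int) (years : Int) (out : Int) : Prop := out = loan_total_payment_alt principal annual_rate_bp years
instance (principal : Int) (annual_rate_bp : Int) (years : Int) (out : Int) : Decidable (Spec_loan_total_payment principal annual_rate_bp years out) := by unfold Spec_loan_total_payment; infer_instance

-- ===== CLAIM (what is proved, stated in full; the proofs are below) =====
def Claim_equal_loan_total_payment : Prop := ∀ (principal : Int) (annual_rate_bp : Int) (years : Int), Dom_loan_total_payment principal annual_rate_bp years → Pre_loan_total_payment principal annual_rate_bp years → Spec_loan_total_payment principal annual_rate_bp years (loan_total_payment principal annual_rate_bp years)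

-- ===== LEMMAS AND PROOFS =====

-- A's amortization loop only accumulates monthly_payment: its result is total + fuel * mp.
theorem pvAmortGo_eq (mr mp : Int) :
    ∀ (k : Nat) (bal total : Int), pvAmortGo mr mp k bal total = total + (k : Int) * mp := by
  intro k
  induction k with
  | zero => intro bal total; simp [pvAmortGo]
  | succ n ih =>
      intro bal total
      simp only [pvAmortGo, ih]
      push_cast
      ring

-- B's fold over range(n) (element ignored) is A's fueled power_frac recursion.
theorem foldl_eq_powerFracGo (num den : Int) :
    ∀ (l : List Int) (r : Int),
      l.foldl (fun f _ => PySem.Int.floordiv (f * num) den) r = pvPowerFracGo num den l.length r := by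
  intro l
  induction l with
  | nil => intro r; simp [pvPowerFracGo]
  | cons x xs ih =>
      intro r
      simp only [List.foldl_cons, List.length_cons, ih, pvPowerFracGo]

theorem factor_eq (num_payments mr : Int) :
    (PySem.List.pyRange 0 num_payments 1).foldl
      (fun f _ => PySem.Int.floordiv (f * 10000) (10000 + mr)) 10000 =
    power_frac 10000 (10000 + mr) num_payments := by
  rw [foldl_eq_powerFracGo]
  simp [power_frac, PySem.List.length_pyRange_one]

-- ===== VERDICT (by name: the statement is the Claim_ definition above) =====
theorem loan_total_payment_spec : Claim_equal_loan_total_payment := by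
  intro principal annual_rate_bp years _hdom hpre
  unfold Spec_loan_total_payment loan_total_payment loan_total_payment_alt
  simp only [factor_eq]
  by_cases h0 : PySem.Int.floordiv annual_rate_bp 12 = 0
  · rw [if_pos h0, if_pos h0]
  · have hy : 1 ≤ years := by
      rcases hpre with h | ⟨hy, _, _⟩
      · exact absurd h h0
      · exact hy
    rw [if_neg h0, if_neg h0]
    have hn : ((years * 12).toNat : Int) = years * 12 := by omega
    rw [pvAmortGo_eq, hn]
    ring_nf
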